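-- pv_equiv track=rewrite | github.com/MD-Woron/2048_on_pygame_for_pc | main.py | compress_d
-- ===== SOURCE A (Python) =====
-- def compress_d(l):
--     """
--     В случае с ходом слева направо
--     Двигается справа налево до элемента с индексом -len + 1 т.к. это ссто процентов либо 0, либо число, с кучей чисел перед ним
--     и находит 0.
--     Ести находит 0, то помещает его в начало строки и удаляет из места нахождения
--     """
--     for i in range(len(l)):
--         temp = -1
--         for i1 in range(len(l)):
--             if l[i][temp] == 0 and abs(temp) < len(l):
--                 l[i].pop(temp)
--                 l[i].insert(0, 0)
--             else:
--                 temp -= 1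
--     return (l)
-- ===== SOURCE B (Python) =====
-- def compress_d(l):
--     # Full 2048 left-compression: move every zero of each row to the front,
--     # keeping the nonzero tiles in order. Builds a new grid (A rewrites l in place).
--     return [[0] * row.count(0) + [x for x in row if x != 0] for row in l]
-- ===== Notes on version B (the rewrite author's own statement) =====
-- stated objective: simpler
-- what changed: A simulates a bounded right-to-left scan per row inside a doubly nested loop, popping each zero it finds and re-inserting it at the front; B is a one-line comprehension that fully compresses each row (all zeros prepended, nonzeros kept in order). Pre_ excludes the inputs on which A raises IndexError (a zero-free row shorter than the grid's row count); A mutates l in place while B builds a new grid, so the equivalence is about the return value.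
-- intended difference: On grids having a row longer than the grid's row count whose cells left of the scanned window are not already zeros-first (or, when only the window's boundary cell holds a zero, contain any nonzero), A's bounded scan strands zeros mid-row and returns a partially compressed row; B returns the fully compressed row (every zero in front, nonzeros in order), the intended 2048 move. — e.g. on compress_d([[1, 0, 2], [3, 4]]): A returns [[1, 0, 2], [3, 4]], B returns [[0, 1, 2], [3, 4]]
import Mathlib
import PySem

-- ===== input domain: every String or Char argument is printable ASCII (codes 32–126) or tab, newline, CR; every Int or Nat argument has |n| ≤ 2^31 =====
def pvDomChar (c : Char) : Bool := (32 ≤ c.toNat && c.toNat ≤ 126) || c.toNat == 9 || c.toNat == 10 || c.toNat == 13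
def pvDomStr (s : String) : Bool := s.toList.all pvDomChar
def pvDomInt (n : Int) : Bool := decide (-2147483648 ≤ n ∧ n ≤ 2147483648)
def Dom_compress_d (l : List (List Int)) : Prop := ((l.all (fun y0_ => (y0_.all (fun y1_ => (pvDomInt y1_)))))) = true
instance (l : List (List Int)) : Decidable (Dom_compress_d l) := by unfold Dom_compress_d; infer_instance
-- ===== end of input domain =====

-- B replaces A's bounded pop-and-reinsert scan by the full per-row compression (all zeros
-- to the front); A mutates the rows of l in place, B builds a new grid: the equivalence
-- proved here is about the return value.

-- ===== PORT A =====
-- one iteration of A's inner loop: state is (the current row, temp).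
-- Python raises IndexError when l[i][temp] is out of range; that happens only outside
-- Pre_compress_d, and this port then takes the else-branch (a value is never produced there).
def compressRowStep (n : Nat) (s : List Int × Int) : List Int × Int :=
  if PySem.List.pyGet? s.1 s.2 = some 0 ∧ s.2.natAbs < n then
    match PySem.List.pop? s.1 s.2 with
    | some p => (PySem.List.insert p.2 0 0, s.2)      -- l[i].pop(temp); l[i].insert(0, 0)
    | none => (s.1, s.2 - 1)                          -- unreachable: pyGet? succeeded above
  else (s.1, s.2 - 1)                                 -- temp -= 1

-- 'for i1 in range(len(l))' — len(l), the number of rows, never changes during the loops.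
def compressRowLoop (n : Nat) (r : List Int) : List Int :=
  ((PySem.List.pyRange 0 (n : Int) 1).foldl (fun s _ => compressRowStep n s) (r, -1)).1

-- 'for i in range(len(l))': each pass rewrites row i (reads l[i] only); i ∈ [0, len l).
def compress_d (l : List (List Int)) : List (List Int) :=
  (PySem.List.pyRange 0 (l.length : Int) 1).foldl
    (fun g i => PySem.List.pySetD g i (compressRowLoop l.length (PySem.List.pyGetD g i [])))
    l

-- ===== PORT B =====
-- [[0] * row.count(0) + [x for x in row if x != 0] for row in l]
def compress_d_alt (l : List (List Int)) : List (List Int) :=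
  l.map (fun row => List.replicate (PySem.List.count row 0) 0
                      ++ row.filter (fun x => decide (x ≠ 0)))

-- ===== PRECONDITION & SPEC =====
-- Pre_ is exactly the set of inputs on which A returns normally: A raises IndexError
-- precisely when some row is shorter than the grid and contains no zero (temp then walks
-- past the left end of that row).
def Pre_compress_d (l : List (List Int)) : Prop :=
  ∀ row ∈ l, l.length ≤ row.length ∨ (0 : Int) ∈ row
instance (l : List (List Int)) : Decidable (Pre_compress_d l) := by unfold Pre_compress_d; infer_instance
def pvWitness_compress_d : List (List Int) := [[0, 1], [2, 0]]

-- On grids having a row longer than the grid's row count whose cells left of the scanned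
-- window are not already zeros-first (or, when only the window's boundary cell holds a
-- zero, contain any nonzero), A's bounded scan strands zeros mid-row and returns a
-- partially compressed row; B returns the fully compressed row (every zero in front,
-- nonzeros in order), the intended 2048 move.
-- badRow n row: A's n-bounded scan of row does NOT fully compress it. The scan reaches
-- only the last n cells; the prefix row[:m-n] is untouched, and the zero on the window's
-- boundary cell row[m-n] moves only if the window behind it also contains a zero.
def badRow (n : Nat) (row : List Int) : Bool :=
  decide (n ≤ row.length) &&
  (if row.getD (row.length - n) 0 = 0 ∧ (row.drop (row.length - n + 1)).all (fun x => x != 0) = true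
   then (row.take (row.length - n)).any (fun x => x != 0)
   else !(((row.take (row.length - n)).dropWhile (fun x => x == 0)).all (fun x => x != 0)))

def D_compress_d (l : List (List Int)) : Prop := ∃ row ∈ l, badRow l.length row = true
instance (l : List (List Int)) : Decidable (D_compress_d l) := by unfold D_compress_d; infer_instance

def Spec_compress_d (l : List (List Int)) (out : List (List Int)) : Prop :=
  ¬ D_compress_d l → out = compress_d_alt l
instance (l : List (List Int)) (out : List (List Int)) : Decidable (Spec_compress_d l out) := by unfold Spec_compress_d; infer_instance

def pvDiffWitness_compress_d : List (List Int) := [[1, 0, 2], [3, 4]]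
def pvDiffWitnessOut_compress_d : (List (List Int)) × (List (List Int)) :=
  ([[1, 0, 2], [3, 4]], [[0, 1, 2], [3, 4]])

-- ===== CLAIM (what is proved, stated in full; the proofs are below) =====
def Claim_unchanged_compress_d : Prop := ∀ (l : List (List Int)), Dom_compress_d l → Pre_compress_d l → Spec_compress_d l (compress_d l)
def Claim_changed_compress_d : Prop := Dom_compress_d (pvDiffWitness_compress_d) ∧ Pre_compress_d (pvDiffWitness_compress_d) ∧ D_compress_d (pvDiffWitness_compress_d) ∧ compress_d (pvDiffWitness_compress_d) = pvDiffWitnessOut_compress_d.1 ∧ compress_d_alt (pvDiffWitness_compress_d) = pvDiffWitnessOut_compress_d.2 ∧ pvDiffWitnessOut_compress_d.1 ≠ pvDiffWitnessOut_compress_d.2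
def Claim_exact_compress_d : Prop := ∀ (l : List (List Int)), Dom_compress_d l → Pre_compress_d l → D_compress_d l → compress_d l ≠ compress_d_alt l

-- ===== LEMMAS AND PROOFS =====

-- a fold that ignores the list elements is an iterate
lemma foldl_const_iterate {α β : Type} (f : α → α) (init : α) (xs : List β) :
    xs.foldl (fun s _ => f s) init = f^[xs.length] init := by
  induction xs generalizing init with
  | nil => rfl
  | cons x xs ih => simpa [Function.iterate_succ_apply] using ih (f init)

lemma pyIdx_shape (X Y : List Int) (e : Int) :
    PySem.List.pyIdx? (X ++ e :: Y).length (-(1 + (Y.length : Int))) = some X.length := by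
  simp only [PySem.List.pyIdx?, List.length_append, List.length_cons]
  have h0 : ¬ (0 ≤ -(1 + (Y.length : Int))) := by omega
  rw [if_neg h0, if_pos (by push_cast; omega)]
  congr 1
  omega

lemma eraseI_shape (X Y : List Int) (e : Int) : (X ++ e :: Y).eraseIdx X.length = X ++ Y := by
  rw [List.eraseIdx_append, if_neg (lt_irrefl _)]
  simp

lemma pyGet_shape (X Y : List Int) (e : Int) :
    PySem.List.pyGet? (X ++ e :: Y) (-(1 + (Y.length : Int))) = some e := by
  unfold PySem.List.pyGet?
  rw [pyIdx_shape]
  simp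

lemma pop_shape (X Y : List Int) (e : Int) :
    PySem.List.pop? (X ++ e :: Y) (-(1 + (Y.length : Int))) = some (e, X ++ Y) := by
  unfold PySem.List.pop?
  rw [pyIdx_shape]
  simp [eraseI_shape]

-- the state of A's inner loop written on the original row: u is the part the scan never
-- reaches, a the part still to be scanned, b the scanned suffix (its zeros sit in front)
def mkSt (u a b : List Int) : List Int × Int :=
  (List.replicate (b.count 0) 0 ++ (u ++ a) ++ b.filter (fun x => decide (x ≠ 0)),
   -(1 + ((b.filter (fun x => decide (x ≠ 0))).length : Int)))

-- as long as every zero scanned is movable (abs(temp) stays below n), one step per element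
lemma clean_invariant (n : Nat) :
    ∀ (a u b : List Int),
      (∀ x y, a = x ++ 0 :: y → ((y ++ b).filter (fun t => decide (t ≠ 0))).length + 1 < n) →
      (compressRowStep n)^[a.length] (mkSt u a b) = mkSt u [] (a ++ b) := by
  intro a
  induction a using List.reverseRecOn with
  | nil => intro u b _; simp
  | append_singleton a' e ih =>
    intro u b H
    rw [List.length_append, List.length_cons, List.length_nil, Nat.zero_add,
      Function.iterate_succ_apply]
    set bf := b.filter (fun t => decide (t ≠ 0)) with hbf
    have hshape : List.replicate (b.count 0) 0 ++ (u ++ (a' ++ [e])) ++ bf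
        = (List.replicate (b.count 0) 0 ++ u ++ a') ++ e :: bf := by
      simp [List.append_assoc]
    by_cases he : e = 0
    · subst he
      have hbnd : bf.length + 1 < n := by
        simpa [hbf] using H a' [] (by simp)
      have hget := pyGet_shape (List.replicate (b.count 0) 0 ++ u ++ a') bf 0
      have hpop := pop_shape (List.replicate (b.count 0) 0 ++ u ++ a') bf 0
      have hstep : compressRowStep n (mkSt u (a' ++ [0]) b) = mkSt u a' (0 :: b) := by
        unfold compressRowStep mkSt
        rw [← hbf, hshape]
        rw [if_pos ⟨hget, by omega⟩, hpop]
        simp [PySem.List.insert_zero, List.replicate_succ, hbf]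
      rw [hstep, ih u (0 :: b) ?_]
      · simp [List.append_assoc]
      · intro x y hxy
        have := H x (y ++ [0]) (by simp [hxy])
        simpa [List.append_assoc] using this
    · have hget := pyGet_shape (List.replicate (b.count 0) 0 ++ u ++ a') bf e
      have hstep : compressRowStep n (mkSt u (a' ++ [e]) b) = mkSt u a' (e :: b) := by
        unfold compressRowStep mkSt
        rw [← hbf, hshape]
        rw [if_neg (by rintro ⟨h1, -⟩; rw [hget] at h1; exact he (by simpa using h1))]
        simp [he, hbf, List.append_assoc]
        ring
      rw [hstep, ih u (e :: b) ?_]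
      · simp [List.append_assoc]
      · intro x y hxy
        have := H x (y ++ [e]) (by simp [hxy])
        simpa [List.append_assoc, he] using this

lemma count_zero_add_filter_length (r : List Int) :
    r.count 0 + (r.filter (fun t => decide (t ≠ 0))).length = r.length := by
  have h := List.length_eq_length_filter_add (l := r) (fun t : Int => t == 0)
  have h1 : r.count 0 = (r.filter (fun t : Int => t == 0)).length := by
    rw [List.count, List.countP_eq_length_filter]
  have h2 : (r.filter (fun t => decide (t ≠ 0))) = r.filter (fun t : Int => !(t == 0)) := by
    apply List.filter_congr; intro x _
    simp only [decide_not]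
    congr 1
  rw [h1, h2, h]

-- a fully scanned row with a zero in front is a fixed point of the loop body: the loop pops
-- a leading zero and puts it back in front
lemma fixpoint_step (n : Nat) (r : List Int) (hz : (0 : Int) ∈ r) (hm : r.length < n) :
    compressRowStep n (mkSt [] [] r) = mkSt [] [] r := by
  have hzpos : 0 < r.count 0 := List.count_pos_iff.2 hz
  have hsplit := count_zero_add_filter_length r
  set bf := r.filter (fun t => decide (t ≠ 0)) with hbf
  have hshape : List.replicate (r.count 0) 0 ++ ([] ++ []) ++ bf
      = List.replicate (r.count 0 - 1) 0 ++ (0 : Int) :: bf := by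
    conv_lhs => rw [show r.count 0 = (r.count 0 - 1) + 1 by omega]
    simp [List.replicate_succ', List.append_assoc]
  have hget := pyGet_shape (List.replicate (r.count 0 - 1) (0 : Int)) bf 0
  have hpop := pop_shape (List.replicate (r.count 0 - 1) (0 : Int)) bf 0
  have hcomm : (0 : Int) :: (List.replicate (r.count 0 - 1) (0 : Int) ++ bf)
      = List.replicate (r.count 0 - 1) (0 : Int) ++ 0 :: bf := by
    rw [← List.cons_append, ← List.replicate_succ, List.replicate_succ']
    simp
  unfold compressRowStep mkSt
  rw [← hbf, hshape]
  rw [if_pos ⟨hget, by omega⟩, hpop]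
  simp [PySem.List.insert_zero, hcomm]

-- the full compression of one row: B's per-row value
def fullC (row : List Int) : List Int :=
  List.replicate (row.count 0) 0 ++ row.filter (fun x => decide (x ≠ 0))

lemma alt_eq_map (l : List (List Int)) : compress_d_alt l = l.map fullC := by
  simp [compress_d_alt, fullC, PySem.List.count_eq]

-- a row shorter than the grid that contains a zero is fully compressed: the scan
-- reaches every cell and then idles on the leading zero
lemma rowLoop_lt (n : Nat) (r : List Int) (hm : r.length < n) (hz : (0 : Int) ∈ r) :
    compressRowLoop n r = fullC r := by
  unfold compressRowLoop fullC
  rw [foldl_const_iterate, PySem.List.length_pyRange_one]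
  have h0 : (((n : Int) - 0)).toNat = n := by omega
  rw [h0]
  have hinit : ((r, -1) : List Int × Int) = mkSt [] r [] := by simp [mkSt]
  have hclean := clean_invariant n r [] [] (by
    intro x y hxy
    have : y.length < r.length := by
      have := congrArg List.length hxy
      simp at this
      omega
    have hle := List.length_filter_le (fun t => decide (t ≠ 0)) y
    simp only [List.append_nil]
    omega)
  rw [show (compressRowStep n)^[n] = (compressRowStep n)^[(n - r.length) + r.length] from by
      rw [Nat.sub_add_cancel (le_of_lt hm)],
    Function.iterate_add_apply, hinit, hclean,
    Function.iterate_fixed (by simpa using fixpoint_step n r hz hm)]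
  simp [mkSt]

-- a row of at least grid length: the scan reaches exactly the last n cells
lemma rowLoop_ge (n : Nat) (u : List Int) (first : Int) (win : List Int)
    (hn : 1 ≤ n) (hwin : win.length = n - 1) :
    compressRowLoop n (u ++ first :: win)
      = if first = 0 ∧ 0 < win.count 0
        then List.replicate (win.count 0 + 1) 0 ++ u ++ win.filter (fun x => decide (x ≠ 0))
        else List.replicate (win.count 0) 0 ++ u ++ first :: win.filter (fun x => decide (x ≠ 0)) := by
  unfold compressRowLoop
  rw [foldl_const_iterate, PySem.List.length_pyRange_one,
    show (((n : Int) - 0)).toNat = n by omega]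
  have hsum := count_zero_add_filter_length win
  by_cases hf : first = 0
  · subst hf
    have hclean := clean_invariant n win (u ++ [0]) [] (by
      intro x y hxy
      have hlen : win.length = x.length + y.length + 1 := by rw [hxy]; simp; omega
      have := List.length_filter_le (fun t => decide (t ≠ 0)) y
      simp only [List.append_nil]
      omega)
    have hsplit : (compressRowStep n)^[n] ((u ++ 0 :: win, -1) : List Int × Int)
        = compressRowStep n ((compressRowStep n)^[n - 1] (u ++ 0 :: win, -1)) := by
      have h := Function.iterate_add_apply (compressRowStep n) 1 (n - 1)
        ((u ++ 0 :: win, -1) : List Int × Int)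
      rw [show 1 + (n - 1) = n by omega] at h
      simpa using h
    have hinit : ((u ++ 0 :: win, -1) : List Int × Int) = mkSt (u ++ [0]) win [] := by
      simp [mkSt, List.append_assoc]
    rw [hsplit, show n - 1 = win.length from by omega, hinit, hclean]
    by_cases hz : 0 < win.count 0
    · rw [if_pos ⟨rfl, hz⟩]
      have hget := pyGet_shape (List.replicate (win.count 0) 0 ++ u)
        (win.filter (fun x => decide (x ≠ 0))) 0
      have hpop := pop_shape (List.replicate (win.count 0) 0 ++ u)
        (win.filter (fun x => decide (x ≠ 0))) 0
      have hmk : mkSt (u ++ [0]) [] (win ++ [])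
          = ((List.replicate (win.count 0) 0 ++ u) ++ (0 : Int) ::
                win.filter (fun x => decide (x ≠ 0)),
             -(1 + ((win.filter (fun x => decide (x ≠ 0))).length : Int))) := by
        simp [mkSt, List.append_assoc]
      rw [hmk]
      unfold compressRowStep
      rw [if_pos ⟨hget, by omega⟩, hpop]
      simp [PySem.List.insert_zero, List.replicate_succ, List.append_assoc]
    · rw [if_neg (by rintro ⟨-, h⟩; omega)]
      have hcz : win.count 0 = 0 := by omega
      have hfw : win.filter (fun x => decide (x ≠ 0)) = win := by
        refine List.filter_eq_self.2 (fun x hx => by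
          simp
          intro h0
          exact absurd (List.count_pos_iff.2 (h0 ▸ hx)) (by omega))
      have hmk : mkSt (u ++ [0]) [] (win ++ [])
          = (u ++ (0 : Int) :: win, -(1 + (win.length : Int))) := by
        simp [mkSt, hcz, List.append_assoc]
        exact fun a ha h0 => absurd (List.count_pos_iff.2 (h0 ▸ ha)) (by omega)
      rw [hmk]
      unfold compressRowStep
      rw [if_neg (by rintro ⟨-, habs⟩; omega)]
      simp [hcz]
      simpa using hfw.symm
  · have hclean := clean_invariant n (first :: win) u [] (by
      intro x y hxy
      cases x with
      | nil =>
        simp at hxy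
        exact absurd hxy.1 hf
      | cons a t =>
        have hlen : win.length = t.length + y.length + 1 := by
          have := congrArg List.length hxy
          simp at this
          omega
        have := List.length_filter_le (fun tt => decide (tt ≠ 0)) y
        simp only [List.append_nil]
        omega)
    have hinit : ((u ++ first :: win, -1) : List Int × Int) = mkSt u (first :: win) [] := by
      simp [mkSt]
    have hiter : (compressRowStep n)^[n] = (compressRowStep n)^[(first :: win).length] := by
      congr 1
      simp [hwin]
      omega
    rw [hiter, hinit, hclean, if_neg (by rintro ⟨h, -⟩; exact hf h)]
    simp [mkSt, hf, List.append_assoc]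

-- A's outer loop is a map over the rows
lemma outer_fold_map (f : List Int → List Int) :
    ∀ (todo done : List (List Int)),
      (PySem.List.pyRange (done.length : Int) ((done.length : Int) + todo.length) 1).foldl
        (fun g i => PySem.List.pySetD g i (f (PySem.List.pyGetD g i []))) (done ++ todo)
      = done ++ todo.map f := by
  intro todo
  induction todo with
  | nil => intro done; simp [PySem.List.pyRange_one_eq_nil]
  | cons r rest ih =>
    intro done
    have hlt : (done.length : Int) < (done.length : Int) + ((r :: rest).length : Int) := by
      rw [List.length_cons]; push_cast; omega
    rw [PySem.List.pyRange_one_cons hlt]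
    simp only [List.foldl_cons]
    have hget : PySem.List.pyGetD (done ++ r :: rest) (done.length : Int) [] = r := by
      rw [PySem.List.pyGetD_natCast]
      simp [List.getD]
    have hset : PySem.List.pySetD (done ++ r :: rest) (done.length : Int) (f r)
        = (done ++ [f r]) ++ rest := by
      rw [PySem.List.pySetD_natCast]
      rw [List.set_append_right _ _ (le_refl _)]
      simp
    rw [hget, hset]
    have := ih (done ++ [f r])
    have harg : ((done ++ [f r]).length : Int) = (done.length : Int) + 1 := by simp
    rw [harg] at this
    rw [show (done.length : Int) + ((r :: rest).length : Int)
        = ((done.length : Int) + 1) + (rest.length : Int) by rw [List.length_cons]; push_cast; ring]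
    rw [this]
    simp

-- A's value is the bounded per-row scan, mapped over the rows
lemma compress_d_eq_map (l : List (List Int)) :
    compress_d l = l.map (compressRowLoop l.length) := by
  unfold compress_d
  have := outer_fold_map (compressRowLoop l.length) l []
  simp only [List.length_nil, Int.natCast_zero, Int.zero_add, List.nil_append] at this
  rw [this]

-- two lists sharing the suffix 'tail' and a zero-block prefix are equal iff the middles are
lemma shape_eq_iff (K c : Nat) (head nzH tail : List Int) :
    List.replicate K (0 : Int) ++ head ++ tail
        = List.replicate (c + K) (0 : Int) ++ (nzH ++ tail)
      ↔ head = List.replicate c (0 : Int) ++ nzH := by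
  have hr : List.replicate (c + K) (0 : Int) ++ (nzH ++ tail)
      = List.replicate K (0 : Int) ++ ((List.replicate c (0 : Int) ++ nzH) ++ tail) := by
    rw [Nat.add_comm c K, List.replicate_add, List.append_assoc, List.append_assoc]
  rw [hr, List.append_assoc]
  constructor
  · intro h
    exact List.append_cancel_right (List.append_cancel_left h)
  · intro h
    simp [h, List.append_assoc]

-- a zero-free list, as the Boolean scan sees it
lemma all_ne_iff_count (t : List Int) :
    t.all (fun x => x != 0) = true ↔ t.count 0 = 0 := by
  rw [List.all_eq_true, List.count_eq_zero]
  constructor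
  · intro h hmem
    simpa using h 0 hmem
  · intro h x hx
    simp only [bne_iff_ne, ne_eq]
    rintro rfl
    exact h hx

-- the cheap 'zeros first' scan recognises exactly the fully compressed lists
lemma compressed_iff (H : List Int) :
    (H.dropWhile (fun x => x == 0)).all (fun x => x != 0) = true
      ↔ H = List.replicate (H.count 0) 0 ++ H.filter (fun x => decide (x ≠ 0)) := by
  induction H with
  | nil => simp
  | cons a t ih =>
    by_cases ha : a = 0
    · subst ha
      rw [List.dropWhile_cons_of_pos (by simp), ih]
      have hc : ((0 : Int) :: t).count 0 = t.count 0 + 1 := List.count_cons_self ..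
      have hfz : ((0 : Int) :: t).filter (fun x => decide (x ≠ 0))
          = t.filter (fun x => decide (x ≠ 0)) := by
        rw [List.filter_cons]
        simp
      rw [hc, hfz, List.replicate_succ, List.cons_append]
      exact ⟨fun h => congrArg (List.cons 0) h, fun h => by simpa using h⟩
    · rw [List.dropWhile_cons_of_neg (by simp [ha])]
      constructor
      · intro hall
        have hcnt : (a :: t).count 0 = 0 := (all_ne_iff_count _).1 hall
        have hfil : (a :: t).filter (fun x => decide (x ≠ 0)) = a :: t :=
          List.filter_eq_self.2 (fun x hx => by
            simp only [decide_eq_true_eq]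
            rintro rfl
            exact absurd (List.count_pos_iff.2 hx) (by omega))
        rw [hcnt, hfil]
        rfl
      · intro heq
        cases hc : (a :: t).count 0 with
        | zero => exact (all_ne_iff_count _).2 hc
        | succ c =>
          rw [hc, List.replicate_succ, List.cons_append] at heq
          simp only [List.cons.injEq] at heq
          exact absurd heq.1 ha

-- decomposition of a row of at least grid length into untouched prefix / boundary cell / window
lemma row_decomp (n : Nat) (row : List Int) (hm : n ≤ row.length) (hn : 1 ≤ n) :
    row = row.take (row.length - n)
          ++ row.getD (row.length - n) 0 :: row.drop (row.length - n + 1)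
      ∧ (row.drop (row.length - n + 1)).length = n - 1 := by
  have hidx : row.length - n < row.length := by omega
  have hdrop : row.drop (row.length - n)
      = row[row.length - n] :: row.drop (row.length - n + 1) :=
    List.drop_eq_getElem_cons hidx
  have hgetD : row.getD (row.length - n) 0 = row[row.length - n] :=
    List.getD_eq_getElem row 0 hidx
  refine ⟨?_, by simp [List.length_drop]; omega⟩
  rw [hgetD, ← hdrop, List.take_append_drop]

-- the per-row verdict: A's bounded scan equals the full compression exactly when the row
-- is not bad (badRow's two branches match the scan's two outcomes)
lemma rowLoop_eq_fullC (n : Nat) (row : List Int) (hn : 1 ≤ n)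
    (hpre : n ≤ row.length ∨ (0 : Int) ∈ row) :
    (badRow n row = false → compressRowLoop n row = fullC row)
      ∧ (badRow n row = true → compressRowLoop n row ≠ fullC row) := by
  by_cases hm : n ≤ row.length
  · obtain ⟨hE, hlw⟩ := row_decomp n row hm hn
    -- abbreviations for the three pieces and the compressed forms
    generalize hH : row.take (row.length - n) = H at hE
    generalize hf' : row.getD (row.length - n) 0 = f at hE
    generalize hW : row.drop (row.length - n + 1) = W at hE hlw
    have hbadeq : badRow n row
        = (if f = 0 ∧ W.all (fun x => x != 0) = true
           then H.any (fun x => x != 0)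
           else !((H.dropWhile (fun x => x == 0)).all (fun x => x != 0))) := by
      simp only [badRow, hH, hf', hW, hm, decide_true, Bool.true_and]
    have hge := rowLoop_ge n H f W hn hlw
    rw [← hE] at hge
    have hcA : (H ++ f :: W).count 0 = H.count 0 + (f :: W).count 0 := List.count_append ..
    have hfA : (H ++ f :: W).filter (fun x => decide (x ≠ 0))
        = H.filter (fun x => decide (x ≠ 0)) ++ (f :: W).filter (fun x => decide (x ≠ 0)) :=
      List.filter_append ..
    by_cases hf : f = 0
    · subst hf
      have hcnt : ((0 : Int) :: W).count 0 = W.count 0 + 1 := List.count_cons_self ..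
      have hfilt : ((0 : Int) :: W).filter (fun x => decide (x ≠ 0))
          = W.filter (fun x => decide (x ≠ 0)) := by
        rw [List.filter_cons]
        simp
      have hfull : fullC row
          = List.replicate (H.count 0 + (W.count 0 + 1)) 0
            ++ (H.filter (fun x => decide (x ≠ 0))
                  ++ W.filter (fun x => decide (x ≠ 0))) := by
        rw [fullC, hE, hcA, hfA, hcnt, hfilt]
      by_cases hk : 0 < W.count 0
      · -- branch 1: the boundary zero moves together with the window's zeros
        rw [hge, if_pos ⟨rfl, hk⟩]
        have hbad : badRow n row
            = !((H.dropWhile (fun x => x == 0)).all (fun x => x != 0)) := by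
          rw [hbadeq,
            if_neg (by rintro ⟨-, h⟩; have := (all_ne_iff_count W).1 h; omega)]
        have hiff := shape_eq_iff (W.count 0 + 1) (H.count 0) H
          (H.filter (fun x => decide (x ≠ 0))) (W.filter (fun x => decide (x ≠ 0)))
        rw [hfull]
        constructor
        · intro hb
          rw [hbad, Bool.not_eq_false'] at hb
          exact hiff.2 ((compressed_iff H).1 hb)
        · intro hb heq
          rw [hbad, Bool.not_eq_true'] at hb
          rw [(compressed_iff H).2 (hiff.1 heq)] at hb
          cases hb
      · -- branch 2b: the boundary zero is stuck behind a zero-free window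
        have hkz : W.count 0 = 0 := by omega
        rw [hge, if_neg (by rintro ⟨-, h⟩; omega)]
        have hbad : badRow n row = H.any (fun x => x != 0) := by
          rw [hbadeq, if_pos ⟨rfl, (all_ne_iff_count W).2 hkz⟩]
        rw [hfull, hkz, List.replicate_zero, List.nil_append]
        constructor
        · intro hb
          rw [hbad] at hb
          have hall : ∀ x ∈ H, x = 0 := by
            intro x hx
            by_contra hx0
            rw [← Bool.not_eq_true, List.any_eq_true] at hb
            exact hb ⟨x, hx, by simpa using hx0⟩
          have hcl : H.count 0 = H.length := by
            rw [List.count_eq_length]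
            intro x hx
            simp [hall x hx]
          have hrep : H = List.replicate (H.count 0) 0 := by
            rw [hcl]
            exact List.eq_replicate_of_mem hall
          have hfe : H.filter (fun x => decide (x ≠ 0)) = [] := by
            rw [List.filter_eq_nil_iff]
            intro x hx
            simp [hall x hx]
          rw [hfe, List.nil_append]
          conv_lhs => rw [hrep]
          rw [show H.count 0 + 1 = H.count 0 + 1 from rfl, List.replicate_succ']
          simp [List.append_assoc]
        · intro hb heq
          rw [hbad, List.any_eq_true] at hb
          obtain ⟨y0, hy0, hy0ne⟩ := hb
          have hy0ne' : y0 ≠ 0 := by simpa using hy0ne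
          have hnzH_ne : H.filter (fun x => decide (x ≠ 0)) ≠ [] := by
            intro hnil
            have := List.filter_eq_nil_iff.1 hnil y0 hy0
            simp [hy0ne'] at this
          have hassoc : H ++ (0 : Int) :: W.filter (fun x => decide (x ≠ 0))
              = (H ++ [0]) ++ W.filter (fun x => decide (x ≠ 0)) := by
            simp [List.append_assoc]
          rw [hassoc, ← List.append_assoc] at heq
          simp only [Nat.zero_add] at heq
          have h1 : H ++ [(0 : Int)]
              = List.replicate (H.count 0 + 1) 0 ++ H.filter (fun x => decide (x ≠ 0)) :=
            List.append_cancel_right heq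
          obtain ⟨t, y, hty⟩ :=
            (List.eq_nil_or_concat (H.filter (fun x => decide (x ≠ 0)))).resolve_left hnzH_ne
          rw [hty, List.concat_eq_append, ← List.append_assoc,
            ← List.concat_eq_append, ← List.concat_eq_append] at h1
          have hlast := List.concat_inj.1 h1
          have hy_mem : y ∈ H.filter (fun x => decide (x ≠ 0)) := by
            rw [hty, List.concat_eq_append]
            simp
          have : y ≠ 0 := by simpa using (List.mem_filter.1 hy_mem).2
          exact this hlast.2.symm
    · -- branch 2a: nonzero boundary cell, kept in place
      have hcnt : (f :: W).count 0 = W.count 0 := List.count_cons_of_ne hf ..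
      have hfilt : (f :: W).filter (fun x => decide (x ≠ 0))
          = f :: W.filter (fun x => decide (x ≠ 0)) := by
        rw [List.filter_cons]
        simp [hf]
      have hfull : fullC row
          = List.replicate (H.count 0 + W.count 0) 0
            ++ (H.filter (fun x => decide (x ≠ 0))
                  ++ f :: W.filter (fun x => decide (x ≠ 0))) := by
        rw [fullC, hE, hcA, hfA, hcnt, hfilt]
      rw [hge, if_neg (by rintro ⟨h, -⟩; exact hf h)]
      have hbad : badRow n row
          = !((H.dropWhile (fun x => x == 0)).all (fun x => x != 0)) := by
        rw [hbadeq, if_neg (by rintro ⟨h, -⟩; exact hf h)]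
      have hiff := shape_eq_iff (W.count 0) (H.count 0) H
        (H.filter (fun x => decide (x ≠ 0))) (f :: W.filter (fun x => decide (x ≠ 0)))
      rw [hfull]
      constructor
      · intro hb
        rw [hbad, Bool.not_eq_false'] at hb
        exact hiff.2 ((compressed_iff H).1 hb)
      · intro hb heq
        rw [hbad, Bool.not_eq_true'] at hb
        rw [(compressed_iff H).2 (hiff.1 heq)] at hb
        cases hb
  · -- a row shorter than the grid: fully compressed (Pre_ gives it a zero), never bad
    have hz : (0 : Int) ∈ row := hpre.resolve_left hm
    have hbad : badRow n row = false := by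
      simp [badRow, hm]
    refine ⟨fun _ => rowLoop_lt n row (by omega) hz, fun hb => by rw [hbad] at hb; cases hb⟩

-- ===== VERDICT (by name: the statements are the Claim_ definitions above) =====
theorem compress_d_spec : Claim_unchanged_compress_d := by
  intro l _ hpre hnD
  rw [compress_d_eq_map l, alt_eq_map]
  apply List.map_congr_left
  intro row hrow
  have hn1 : 1 ≤ l.length := List.length_pos_of_ne_nil (by rintro rfl; simp at hrow)
  have hnb : badRow l.length row = false := by
    by_contra h
    exact hnD ⟨row, hrow, by simpa using h⟩
  exact (rowLoop_eq_fullC l.length row hn1 (hpre row hrow)).1 hnb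

theorem compress_d_changed : Claim_changed_compress_d := by
  unfold Claim_changed_compress_d
  decide

theorem compress_d_tight : Claim_exact_compress_d := by
  intro l _ hpre hD heq
  obtain ⟨row, hrow, hb⟩ := hD
  have hn1 : 1 ≤ l.length := List.length_pos_of_ne_nil (by rintro rfl; simp at hrow)
  obtain ⟨i, hi, hieq⟩ := List.mem_iff_getElem.1 hrow
  have hne := (rowLoop_eq_fullC l.length row hn1 (hpre row hrow)).2 hb
  rw [compress_d_eq_map l, alt_eq_map] at heq
  apply hne
  have h1 := congrArg (fun xs : List (List Int) => xs[i]?) heq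
  simp only [List.getElem?_map] at h1
  rw [List.getElem?_eq_getElem hi, hieq] at h1
  simpa using h1
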